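-- pv_equiv track=rewrite | github.com/airaagusin/Automata | mealy_moore.py | mealy_machine
-- ===== SOURCE A (Python) =====
-- def mealy_machine(input_str):
--     """
--     Mealy Machine that prints 'a' whenever '01' sequence is found.
--     Output depends on transition (state + input).
--     """
--     state = 'A'
--     output = []
--
--     for symbol in input_str:
--         if state == 'A':
--             if symbol == '0':
--                 state = 'B'
--                 output.append('b')
--             else:  # symbol == '1'
--                 state = 'A'
--                 output.append('b')
--
--         elif state == 'B':
--             if symbol == '0':
--                 state = 'B'
--                 output.append('b')
--             else:  # symbol == '1'
--                 state = 'C'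
--                 output.append('a')
--
--         elif state == 'C':
--             if symbol == '0':
--                 state = 'B'
--                 output.append('b')
--             else:  # symbol == '1'
--                 state = 'A'
--                 output.append('b')
--
--     return ''.join(output)
-- ===== SOURCE B (Python) =====
-- def mealy_machine(input_str):
--     # One-character lookback instead of a 3-state machine:
--     # 'a' is emitted exactly when the previous symbol was '0' and the current one is not.
--     prev = None
--     out = []
--     for c in input_str:
--         out.append('a' if prev == '0' and c != '0' else 'b')
--         prev = c
--     return ''.join(out)
-- ===== Notes on version B (the rewrite author's own statement) =====
-- stated objective: simpler
-- what changed: Replaced the explicit three-state ('A'/'B'/'C') Mealy machine with a single pass that remembers only the previous symbol and emits 'a' iff prev=='0' and current!='0'.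
import Mathlib
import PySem

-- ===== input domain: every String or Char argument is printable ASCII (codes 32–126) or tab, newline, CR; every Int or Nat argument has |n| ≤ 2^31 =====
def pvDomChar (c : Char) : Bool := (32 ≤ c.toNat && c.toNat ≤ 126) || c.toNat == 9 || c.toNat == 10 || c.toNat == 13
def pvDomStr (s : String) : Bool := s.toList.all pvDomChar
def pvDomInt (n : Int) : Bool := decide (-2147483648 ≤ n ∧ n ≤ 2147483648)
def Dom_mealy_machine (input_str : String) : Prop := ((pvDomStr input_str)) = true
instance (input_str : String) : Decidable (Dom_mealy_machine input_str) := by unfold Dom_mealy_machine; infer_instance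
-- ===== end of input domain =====

-- B replaces the three-state machine with a one-character lookback (objective: simpler).

-- ===== PORT A =====
-- one step of A's for-loop: (state, output) updated by the nested if/elif chain
def mealyStepA (acc : Char × List Char) (symbol : Char) : Char × List Char :=
  let state := acc.1
  let output := acc.2
  if state = 'A' then
    if symbol = '0' then ('B', output ++ ['b']) else ('A', output ++ ['b'])
  else if state = 'B' then
    if symbol = '0' then ('B', output ++ ['b']) else ('C', output ++ ['a'])
  else -- state == 'C' (the only remaining reachable state)
    if symbol = '0' then ('B', output ++ ['b']) else ('A', output ++ ['b'])

def mealy_machine (input_str : String) : String :=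
  String.mk (input_str.toList.foldl mealyStepA ('A', [])).2

-- ===== PORT B =====
-- one step of B's loop: (prev, output) with a single lookback character
def mealyStepB (acc : Option Char × List Char) (c : Char) : Option Char × List Char :=
  (some c, acc.2 ++ [if acc.1 = some '0' ∧ c ≠ '0' then 'a' else 'b'])

def mealy_machine_alt (input_str : String) : String :=
  String.mk (input_str.toList.foldl mealyStepB ((none : Option Char), [])).2

-- ===== PRECONDITION & SPEC =====
def Spec_mealy_machine (input_str : String) (out : String) : Prop := out = mealy_machine_alt input_str
instance (input_str : String) (out : String) : Decidable (Spec_mealy_machine input_str out) := by unfold Spec_mealy_machine; infer_instance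

-- ===== CLAIM (what is proved, stated in full; the proofs are below) =====
def Claim_equal_mealy_machine : Prop := ∀ (input_str : String), Dom_mealy_machine input_str → Spec_mealy_machine input_str (mealy_machine input_str)

-- ===== LEMMAS AND PROOFS =====

-- Invariant: A is in state 'B' exactly when B's lookback is '0'; states 'A'/'C' behave identically.
theorem mealy_loop_eq (l : List Char) (out : List Char) (state : Char) (prev : Option Char)
    (hst : state = 'A' ∨ state = 'B' ∨ state = 'C')
    (hinv : state = 'B' ↔ prev = some '0') :
    (l.foldl mealyStepA (state, out)).2 = (l.foldl mealyStepB (prev, out)).2 := by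
  induction l generalizing out state prev with
  | nil => rfl
  | cons c tl ih =>
    simp only [List.foldl_cons]
    rcases hst with h | h | h <;> subst h <;>
      by_cases hc : c = '0' <;>
        simp_all [mealyStepA, mealyStepB] <;>
          first
          | exact ih _ 'B' (some c) (by simp) (by simp [hc])
          | exact ih _ 'A' (some c) (by simp) (by simp [hc])
          | exact ih _ 'C' (some c) (by simp) (by simp [hc])

-- ===== VERDICT (by name: the statement is the Claim_ definition above) =====
theorem mealy_machine_spec : Claim_equal_mealy_machine := by
  intro s _
  unfold Spec_mealy_machine mealy_machine mealy_machine_alt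
  rw [mealy_loop_eq s.toList [] 'A' none (Or.inl rfl) (by simp)]
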